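-- pv_equiv track=rewrite | github.com/AtoBrightSide/contests | pastContests/A_Interview.py | solution
-- ===== SOURCE A (Python) =====
-- def solution(a, b, n):
--     ans = 0
--     for i in range(n):
--         temp_b = temp_a = 0
--         for j in range(i, n):
--             temp_a |= a[j]
--             temp_b |= b[j]
--
--         ans = max(ans, temp_a + temp_b)
--
--     return ans
-- ===== SOURCE B (Python) =====
-- def solution(a, b, n):
--     # One backward pass: running ORs of the suffixes replace the nested loop.
--     ans = 0
--     sa = sb = 0
--     for j in range(n - 1, -1, -1):
--         sa |= a[j]
--         sb |= b[j]
--         if sa + sb > ans: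
--             ans = sa + sb
--     return ans
-- ===== Notes on version B (the rewrite author's own statement) =====
-- stated objective: faster
-- what changed: B replaces the nested loop that recomputes each suffix OR from scratch by a single backward pass maintaining running suffix ORs of a and b
import Mathlib
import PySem

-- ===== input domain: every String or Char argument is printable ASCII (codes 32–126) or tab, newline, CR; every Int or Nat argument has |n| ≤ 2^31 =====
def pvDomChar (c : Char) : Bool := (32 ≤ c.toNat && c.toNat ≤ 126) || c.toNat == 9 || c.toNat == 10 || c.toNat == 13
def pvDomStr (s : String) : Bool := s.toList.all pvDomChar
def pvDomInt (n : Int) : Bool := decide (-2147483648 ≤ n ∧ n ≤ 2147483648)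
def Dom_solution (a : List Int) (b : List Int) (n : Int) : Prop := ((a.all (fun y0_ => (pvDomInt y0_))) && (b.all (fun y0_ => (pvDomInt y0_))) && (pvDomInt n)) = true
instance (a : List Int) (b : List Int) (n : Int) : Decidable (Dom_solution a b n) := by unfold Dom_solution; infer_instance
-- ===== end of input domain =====

-- B replaces A's nested loop (which recomputes each suffix OR from scratch) by one
-- backward pass maintaining running suffix ORs; equal return value proved on Pre_.

-- ===== PORT A =====
def solution (a : List Int) (b : List Int) (n : Int) : Int :=
  (PySem.List.pyRange 0 n 1).foldl
    (fun ans i =>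
      let tp := (PySem.List.pyRange i n 1).foldl
        (fun (tp : Int × Int) j =>
          (PySem.Int.bor tp.1 (PySem.List.pyGetD a j 0),
           PySem.Int.bor tp.2 (PySem.List.pyGetD b j 0))) (0, 0)
      max ans (tp.1 + tp.2)) 0

-- ===== PORT B =====
def solution_alt (a : List Int) (b : List Int) (n : Int) : Int :=
  let st := (PySem.List.pyRange (n - 1) (-1) (-1)).foldl
    (fun (st : Int × Int × Int) j =>
      let sa := PySem.Int.bor st.2.1 (PySem.List.pyGetD a j 0)
      let sb := PySem.Int.bor st.2.2 (PySem.List.pyGetD b j 0)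
      (if sa + sb > st.1 then sa + sb else st.1, sa, sb)) (0, 0, 0)
  st.1

-- ===== PRECONDITION & SPEC =====
-- A indexes a[j], b[j] for 0 ≤ j < n, so it raises IndexError iff n exceeds a length.
def Pre_solution (a : List Int) (b : List Int) (n : Int) : Prop :=
  n ≤ (a.length : Int) ∧ n ≤ (b.length : Int)
instance (a : List Int) (b : List Int) (n : Int) : Decidable (Pre_solution a b n) := by
  unfold Pre_solution; infer_instance
def pvWitness_solution : List Int × List Int × Int := ([1, 2], [3, 4], 2)

def Spec_solution (a : List Int) (b : List Int) (n : Int) (out : Int) : Prop := out = solution_alt a b n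
instance (a : List Int) (b : List Int) (n : Int) (out : Int) : Decidable (Spec_solution a b n out) := by unfold Spec_solution; infer_instance

-- ===== CLAIM (what is proved, stated in full; the proofs are below) =====
def Claim_equal_solution : Prop := ∀ (a : List Int) (b : List Int) (n : Int), Dom_solution a b n → Pre_solution a b n → Spec_solution a b n (solution a b n)

-- ===== LEMMAS AND PROOFS =====

-- signed "test bit" of a Python int (two's-complement view)
def pvTB (x : Int) (k : Nat) : Bool :=
  if 0 ≤ x then x.toNat.testBit k else !((-x - 1).toNat.testBit k)

lemma pvAndModTwo (a b : Nat) : (a &&& b) % 2 = 1 ↔ (a % 2 = 1 ∧ b % 2 = 1) := by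
  have h0 : (a &&& b).testBit 0 = (a.testBit 0 && b.testBit 0) := Nat.testBit_and ..
  rcases Nat.mod_two_eq_zero_or_one (a &&& b) with h | h <;>
    rcases Nat.mod_two_eq_zero_or_one a with h1 | h1 <;>
      rcases Nat.mod_two_eq_zero_or_one b with h2 | h2 <;>
        simp [Nat.testBit_zero, h, h1, h2] at h0 ⊢

lemma pvSubAndTB (a : Nat) : ∀ b k : Nat,
    (a - (a &&& b)).testBit k = (a.testBit k && !(b.testBit k)) := by
  induction a using Nat.strong_induction_on with
  | _ a IH =>
    intro b k
    by_cases ha : a = 0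
    · subst ha; simp
    have hd2 : (a &&& b) / 2 = (a / 2) &&& (b / 2) := Nat.and_div_two
    have hle : a &&& b ≤ a := Nat.and_le_left
    have hle2 : (a / 2) &&& (b / 2) ≤ a / 2 := Nat.and_le_left
    have hm := pvAndModTwo a b
    have hmle : (a &&& b) % 2 ≤ a % 2 := by
      by_cases h : (a &&& b) % 2 = 1
      · have := hm.mp h; omega
      · omega
    cases k with
    | zero =>
      simp only [Nat.testBit_zero]
      by_cases h1 : a % 2 = 1 <;> by_cases h2 : b % 2 = 1 <;> simp [h1, h2] <;> omega
    | succ k =>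
      rw [Nat.testBit_add_one, Nat.testBit_add_one a, Nat.testBit_add_one b]
      have hdiv : (a - (a &&& b)) / 2 = a / 2 - ((a / 2) &&& (b / 2)) := by omega
      rw [hdiv]
      exact IH (a / 2) (by omega) (b / 2) k

lemma pvBor_nonneg (x y : Int) : 0 ≤ PySem.Int.bor x y ↔ (0 ≤ x ∧ 0 ≤ y) := by
  unfold PySem.Int.bor
  split_ifs <;> omega

lemma pvTB_bor (x y : Int) (k : Nat) :
    pvTB (PySem.Int.bor x y) k = (pvTB x k || pvTB y k) := by
  unfold pvTB PySem.Int.bor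
  by_cases hx : 0 ≤ x <;> by_cases hy : 0 ≤ y <;> simp only [hx, hy, if_true, if_false]
  · simp [Nat.testBit_or]
  · have hd : (0 : Int) ≤ ((-y - 1).toNat - ((-y - 1).toNat &&& x.toNat) : Nat) :=
      Int.natCast_nonneg _
    have he : (-(-(((-y - 1).toNat - ((-y - 1).toNat &&& x.toNat) : Nat) : Int) - 1) - 1).toNat
        = (-y - 1).toNat - ((-y - 1).toNat &&& x.toNat) := by omega
    split_ifs with h
    · exfalso; omega
    · rw [he, pvSubAndTB]
      cases x.toNat.testBit k <;> cases (-y - 1).toNat.testBit k <;> rfl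
  · have hd : (0 : Int) ≤ ((-x - 1).toNat - ((-x - 1).toNat &&& y.toNat) : Nat) :=
      Int.natCast_nonneg _
    have he : (-(-(((-x - 1).toNat - ((-x - 1).toNat &&& y.toNat) : Nat) : Int) - 1) - 1).toNat
        = (-x - 1).toNat - ((-x - 1).toNat &&& y.toNat) := by omega
    split_ifs with h
    · exfalso; omega
    · rw [he, pvSubAndTB]
      cases y.toNat.testBit k <;> cases (-x - 1).toNat.testBit k <;> rfl
  · have hd : (0 : Int) ≤ (((-x - 1).toNat &&& (-y - 1).toNat : Nat) : Int) :=
      Int.natCast_nonneg _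
    have he : (-(-(((-x - 1).toNat &&& (-y - 1).toNat : Nat) : Int) - 1) - 1).toNat
        = (-x - 1).toNat &&& (-y - 1).toNat := by omega
    split_ifs with h
    · exfalso; omega
    · rw [he, Nat.testBit_and]
      cases (-x - 1).toNat.testBit k <;> cases (-y - 1).toNat.testBit k <;> rfl

lemma pvTB_ext (x y : Int) (hs : (0 ≤ x) ↔ (0 ≤ y)) (h : ∀ k, pvTB x k = pvTB y k) : x = y := by
  by_cases hx : 0 ≤ x
  · have hy : 0 ≤ y := hs.mp hx
    have : x.toNat = y.toNat := Nat.eq_of_testBit_eq fun k => by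
      have hk := h k; simpa [pvTB, hx, hy] using hk
    omega
  · have hy : ¬ 0 ≤ y := fun h' => hx (hs.mpr h')
    have : (-x - 1).toNat = (-y - 1).toNat := Nat.eq_of_testBit_eq fun k => by
      have hk := h k; simpa [pvTB, hx, hy] using hk
    omega

lemma pvBor_assoc (x y z : Int) :
    PySem.Int.bor (PySem.Int.bor x y) z = PySem.Int.bor x (PySem.Int.bor y z) := by
  apply pvTB_ext
  · simp only [pvBor_nonneg]; tauto
  · intro k; simp [pvTB_bor, Bool.or_assoc]

lemma pvZero_bor (x : Int) : PySem.Int.bor 0 x = x := by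
  rw [PySem.Int.bor_comm]; exact PySem.Int.bor_zero x

-- OR of a whole list, and the left-fold pulled apart
def pvOr (l : List Int) : Int := l.foldl PySem.Int.bor 0

lemma pvFoldl_bor (l : List Int) : ∀ z : Int, l.foldl PySem.Int.bor z = PySem.Int.bor z (pvOr l) := by
  induction l with
  | nil => intro z; simp [pvOr, PySem.Int.bor_zero]
  | cons x l IH =>
    intro z
    show l.foldl PySem.Int.bor (PySem.Int.bor z x)
        = PySem.Int.bor z (l.foldl PySem.Int.bor (PySem.Int.bor 0 x))
    rw [IH, IH, pvZero_bor, pvBor_assoc]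

lemma pvOr_cons (x : Int) (l : List Int) : pvOr (x :: l) = PySem.Int.bor x (pvOr l) := by
  show l.foldl PySem.Int.bor (PySem.Int.bor 0 x) = _
  rw [pvFoldl_bor, pvZero_bor]

-- ascending and descending max-folds over the terms t 0 .. t (k-1)
def pvAsc (t : Nat → Int) : Nat → Int → Int
  | 0, z => z
  | k + 1, z => max (pvAsc t k z) (t k)

def pvDsc (t : Nat → Int) : Nat → Int → Int
  | 0, z => z
  | k + 1, z => pvDsc t k (max z (t k))

lemma pvDsc_max (t : Nat → Int) : ∀ (k : Nat) (z x : Int),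
    pvDsc t k (max z x) = max (pvDsc t k z) x := by
  intro k
  induction k with
  | zero => intro z x; rfl
  | succ k IH =>
    intro z x
    show pvDsc t k (max (max z x) (t k)) = max (pvDsc t k (max z (t k))) x
    rw [show max (max z x) (t k) = max (max z (t k)) x by omega, IH]

lemma pvAsc_eq_dsc (t : Nat → Int) : ∀ (k : Nat) (z : Int), pvAsc t k z = pvDsc t k z := by
  intro k
  induction k with
  | zero => intro z; rfl
  | succ k IH =>
    intro z
    show max (pvAsc t k z) (t k) = pvDsc t k (max z (t k))
    rw [IH, pvDsc_max]

lemma pvDropSuffix (a : List Int) (m i : Nat) (ha : m ≤ a.length) (hi : i < m) :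
    (a.take m).drop i = a[i]'(by omega) :: (a.take m).drop (i + 1) := by
  have hlen : i < (a.take m).length := by simp [List.length_take]; omega
  rw [List.drop_eq_getElem_cons hlen]
  congr 1
  exact List.getElem_take

lemma pvDropEnd (a : List Int) (m : Nat) : (a.take m).drop m = [] := by
  apply List.drop_eq_nil_of_le
  simp [List.length_take]

lemma pvInner (a b : List Int) (m : Nat) (ha : m ≤ a.length) (hb : m ≤ b.length) :
    ∀ (k i : Nat), i + k = m → ∀ ta tb : Int,
    (PySem.List.pyRange (i : Int) (m : Int) 1).foldl
      (fun (tp : Int × Int) j =>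
        (PySem.Int.bor tp.1 (PySem.List.pyGetD a j 0),
         PySem.Int.bor tp.2 (PySem.List.pyGetD b j 0))) (ta, tb)
    = (PySem.Int.bor ta (pvOr ((a.take m).drop i)),
       PySem.Int.bor tb (pvOr ((b.take m).drop i))) := by
  intro k
  induction k with
  | zero =>
    intro i hi ta tb
    have hi' : i = m := by omega
    subst hi'
    rw [PySem.List.pyRange_one_eq_nil le_rfl]
    simp [pvOr, PySem.Int.bor_zero]
  | succ k IH =>
    intro i hi ta tb
    have him : i < m := by omega
    rw [PySem.List.pyRange_one_cons (by exact_mod_cast him)]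
    simp only [List.foldl_cons]
    have hga : PySem.List.pyGetD a (i : Int) 0 = a[i]'(by omega) := by
      rw [PySem.List.pyGetD_natCast]
      exact List.getD_eq_getElem _ _ (by omega)
    have hgb : PySem.List.pyGetD b (i : Int) 0 = b[i]'(by omega) := by
      rw [PySem.List.pyGetD_natCast]
      exact List.getD_eq_getElem _ _ (by omega)
    have hcast : (i : Int) + 1 = ((i + 1 : Nat) : Int) := by push_cast; ring
    rw [hga, hgb, hcast, IH (i + 1) (by omega)]
    rw [pvDropSuffix a m i ha him, pvDropSuffix b m i hb him, pvOr_cons, pvOr_cons,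
      pvBor_assoc, pvBor_assoc]

lemma pvOuterA (a b : List Int) (m : Nat) (ha : m ≤ a.length) (hb : m ≤ b.length) :
    ∀ (k : Nat), k ≤ m → ∀ z : Int,
    (PySem.List.pyRange 0 (k : Int) 1).foldl
      (fun ans i =>
        let tp := (PySem.List.pyRange i (m : Int) 1).foldl
          (fun (tp : Int × Int) j =>
            (PySem.Int.bor tp.1 (PySem.List.pyGetD a j 0),
             PySem.Int.bor tp.2 (PySem.List.pyGetD b j 0))) (0, 0)
        max ans (tp.1 + tp.2)) z
    = pvAsc (fun i => pvOr ((a.take m).drop i) + pvOr ((b.take m).drop i)) k z := by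
  intro k
  induction k with
  | zero =>
    intro _ z
    rw [show ((0 : Nat) : Int) = 0 by rfl, PySem.List.pyRange_one_eq_nil le_rfl]
    rfl
  | succ k IH =>
    intro hk z
    have hcast : ((k + 1 : Nat) : Int) = (k : Int) + 1 := by push_cast; ring
    rw [hcast, PySem.List.pyRange_one_succ_right (by positivity), List.foldl_append]
    simp only [List.foldl_cons, List.foldl_nil]
    rw [IH (by omega)]
    show max _ ((((PySem.List.pyRange (k : Int) (m : Int) 1).foldl _ (0, 0)).1)
          + (((PySem.List.pyRange (k : Int) (m : Int) 1).foldl _ (0, 0)).2)) = _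
    rw [pvInner a b m ha hb (m - k) k (by omega) 0 0]
    simp only [pvZero_bor]
    rfl

lemma pvLoopB (a b : List Int) (m : Nat) (ha : m ≤ a.length) (hb : m ≤ b.length) :
    ∀ (k : Nat), k ≤ m → ∀ (z sa0 sb0 : Int),
    sa0 = pvOr ((a.take m).drop k) → sb0 = pvOr ((b.take m).drop k) →
    ((PySem.List.pyRange ((k : Int) - 1) (-1) (-1)).foldl
      (fun (st : Int × Int × Int) j =>
        let sa := PySem.Int.bor st.2.1 (PySem.List.pyGetD a j 0)
        let sb := PySem.Int.bor st.2.2 (PySem.List.pyGetD b j 0)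
        (if sa + sb > st.1 then sa + sb else st.1, sa, sb)) (z, sa0, sb0)).1
    = pvDsc (fun i => pvOr ((a.take m).drop i) + pvOr ((b.take m).drop i)) k z := by
  intro k
  induction k with
  | zero =>
    intro _ z sa0 sb0 _ _
    rw [show ((0 : Nat) : Int) - 1 = -1 by rfl, PySem.List.pyRange_neg_one_eq_nil le_rfl]
    rfl
  | succ k IH =>
    intro hk z sa0 sb0 hsa hsb
    have hkm : k < m := by omega
    have hcast : ((k + 1 : Nat) : Int) - 1 = (k : Int) := by push_cast; ring
    rw [hcast, PySem.List.pyRange_neg_one_cons (by omega)]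
    simp only [List.foldl_cons]
    have hga : PySem.List.pyGetD a (k : Int) 0 = a[k]'(by omega) := by
      rw [PySem.List.pyGetD_natCast]
      exact List.getD_eq_getElem _ _ (by omega)
    have hgb : PySem.List.pyGetD b (k : Int) 0 = b[k]'(by omega) := by
      rw [PySem.List.pyGetD_natCast]
      exact List.getD_eq_getElem _ _ (by omega)
    simp only [hga, hgb, hsa, hsb]
    have hsa' : PySem.Int.bor (pvOr ((a.take m).drop (k + 1))) (a[k]'(by omega))
        = pvOr ((a.take m).drop k) := by
      rw [pvDropSuffix a m k ha hkm, pvOr_cons, PySem.Int.bor_comm]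
    have hsb' : PySem.Int.bor (pvOr ((b.take m).drop (k + 1))) (b[k]'(by omega))
        = pvOr ((b.take m).drop k) := by
      rw [pvDropSuffix b m k hb hkm, pvOr_cons, PySem.Int.bor_comm]
    simp only [hsa', hsb']
    have hmax : (if pvOr ((a.take m).drop k) + pvOr ((b.take m).drop k) > z
          then pvOr ((a.take m).drop k) + pvOr ((b.take m).drop k) else z)
        = max z (pvOr ((a.take m).drop k) + pvOr ((b.take m).drop k)) := by
      split <;> omega
    rw [hmax, IH (by omega) _ _ _ rfl rfl]
    rfl

-- ===== VERDICT (by name: the statement is the Claim_ definition above) =====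
theorem solution_spec : Claim_equal_solution := by
  intro a b n _ hpre
  unfold Spec_solution solution solution_alt
  obtain ⟨h1, h2⟩ := hpre
  by_cases hn : n ≤ 0
  · rw [PySem.List.pyRange_one_eq_nil hn, PySem.List.pyRange_neg_one_eq_nil (by omega)]
    rfl
  · have hm : n = ((n.toNat : Nat) : Int) := by omega
    have ha : n.toNat ≤ a.length := by omega
    have hb : n.toNat ≤ b.length := by omega
    rw [hm]
    rw [pvOuterA a b n.toNat ha hb n.toNat le_rfl 0]
    rw [show ((0, 0, 0) : Int × Int × Int)
        = ((0 : Int), pvOr ((a.take n.toNat).drop n.toNat), pvOr ((b.take n.toNat).drop n.toNat)) by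
      rw [pvDropEnd, pvDropEnd]; rfl]
    rw [pvLoopB a b n.toNat ha hb n.toNat le_rfl 0 _ _ rfl rfl]
    exact pvAsc_eq_dsc _ _ _
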